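-- pv_equiv track=rewrite | github.com/jeff999955/DLCV-2021-Fall | Final_Project/yolov5_inf/inference/post_processing.py | cont
-- ===== SOURCE A (Python) =====
-- def cont(l):
--     cur, n = -1, len(l)
--     for i in range(n):
--         if l[i]:
--             if cur == -1: cur = i
--             else: return True
--         else:
--             cur = -1
--     return False
-- ===== SOURCE B (Python) =====
-- def cont(l):
--     return any(a and b for a, b in zip(l, l[1:]))
-- ===== Notes on version B (the rewrite author's own statement) =====
-- stated objective: simpler
-- what changed: Replaced the stateful index scan with run-tracking accumulator 'cur' and reset branch by a stateless pairwise any() over zip(l, l[1:]).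
import Mathlib
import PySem

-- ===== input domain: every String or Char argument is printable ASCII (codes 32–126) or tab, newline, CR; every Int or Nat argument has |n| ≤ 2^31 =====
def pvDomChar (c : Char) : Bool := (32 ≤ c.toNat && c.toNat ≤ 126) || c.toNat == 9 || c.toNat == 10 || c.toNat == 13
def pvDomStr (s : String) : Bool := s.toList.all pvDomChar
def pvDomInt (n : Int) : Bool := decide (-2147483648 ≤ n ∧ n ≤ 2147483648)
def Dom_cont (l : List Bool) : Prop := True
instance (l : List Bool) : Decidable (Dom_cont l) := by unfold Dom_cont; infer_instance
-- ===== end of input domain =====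

-- B replaces A's stateful scan (index loop with accumulator 'cur' and reset branch)
-- by a stateless pairwise any over adjacent pairs: simpler decomposition, same O(n) cost.


-- ===== PORT A =====
-- loop over i in range(n) with state cur : Int; early return True becomes returning true
def contGo (l : List Bool) (cur : Int) (i : Nat) : Bool :=
  if h : i < l.length then
    if l[i] then
      if cur == -1 then contGo l (Int.ofNat i) (i + 1)
      else true
    else contGo l (-1) (i + 1)
  else false
termination_by l.length - i

def cont (l : List Bool) : Bool := contGo l (-1) 0

-- ===== PORT B =====
-- any(a and b for a, b in zip(l, l[1:]))
def cont_alt (l : List Bool) : Bool :=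
  (l.zip (l.drop 1)).any (fun p => p.1 && p.2)

-- ===== PRECONDITION & SPEC =====
def Spec_cont (l : List Bool) (out : Bool) : Prop := out = cont_alt l
instance (l : List Bool) (out : Bool) : Decidable (Spec_cont l out) := by unfold Spec_cont; infer_instance

-- ===== CLAIM (what is proved, stated in full; the proofs are below) =====
def Claim_equal_cont : Prop := ∀ (l : List Bool), Dom_cont l → Spec_cont l (cont l)

-- ===== LEMMAS AND PROOFS =====

-- A's loop from position i, abstracted to the only thing cur decides: whether cur ≠ -1.
def pairAux (b : Bool) : List Bool → Bool
  | [] => false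
  | x :: xs => if x then (if b then true else pairAux true xs) else pairAux false xs

theorem contGo_eq_pairAux (l : List Bool) (i : Nat) (cur : Int) :
    contGo l cur i = pairAux (!(cur == -1)) (l.drop i) := by
  induction hn : l.length - i using Nat.strong_induction_on generalizing i cur with
  | _ n ih =>
    rw [contGo]
    by_cases h : i < l.length
    · rw [List.drop_eq_getElem_cons h]
      simp only [h, dif_pos, pairAux]
      by_cases hl : l[i] = true
      · simp only [hl, if_pos]
        by_cases hc : cur = -1
        · have : (Int.ofNat i == (-1 : Int)) = false := by
            simp
          simp only [hc, beq_self_eq_true, if_pos, Bool.not_true, if_neg, Bool.not_false]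
          rw [ih (l.length - (i + 1)) (by omega) (i + 1) (Int.ofNat i) rfl, this]
          rfl
        · have : (cur == (-1 : Int)) = false := by simp [hc]
          simp [this]
      · simp only [Bool.not_eq_true] at hl
        simp only [hl, if_neg, Bool.false_eq_true, not_false_iff]
        rw [ih (l.length - (i + 1)) (by omega) (i + 1) (-1) rfl]
        simp
    · have : l.drop i = [] := List.drop_eq_nil_of_le (by omega)
      simp [h, this, pairAux]

theorem pairAux_eq_alt (l : List Bool) (b : Bool) :
    pairAux b l = ((b && l.headD false) || cont_alt l) := by
  induction l generalizing b with
  | nil => simp [pairAux, cont_alt]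
  | cons x xs ih =>
    have hz : cont_alt (x :: xs) = ((x && xs.headD false) || cont_alt xs) := by
      cases xs <;> simp [cont_alt, Bool.or_assoc]
    rw [hz]
    cases x <;> cases b <;> simp [pairAux, ih]

-- ===== VERDICT (by name: the statement is the Claim_ definition above) =====
theorem cont_spec : Claim_equal_cont := by
  intro l _
  show cont l = cont_alt l
  rw [cont, contGo_eq_pairAux]
  simp [pairAux_eq_alt]
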